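-- pv_equiv track=rewrite | github.com/choijaehoon1/programmers_python | greedy/test06.py | solution
-- ===== SOURCE A (Python) =====
-- def solution(routes):
--     answer = 0
--     routes.sort(key = lambda x:x[1])
--
--     check = [0] * len(routes)
--
--     for i in range(len(routes)):
--         if check[i] == 0:
--             camera = routes[i][1]
--             answer += 1
--
--         for j in range(i+1,len(routes)):
--             if routes[j][0] <= camera <= routes[j][1] and check[j] == 0:
--                 check[j] = 1
--
--     return answer
-- ===== SOURCE B (Python) =====
-- def solution(routes):
--     routes.sort(key=lambda x: x[1])
--     answer = 0
--     camera = None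
--     for r in routes:
--         if camera is None or camera < r[0]:
--             answer += 1
--             camera = r[1]
--     return answer
-- ===== Notes on version B (the rewrite author's own statement) =====
-- stated objective: faster
-- what changed: Replaced the quadratic check-array marking (each placed camera rescans all later routes to mark covered ones) by the classic single-pass greedy after the same sort by end: one running 'last camera' value, a new camera exactly when the next route starts after it.
import Mathlib
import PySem

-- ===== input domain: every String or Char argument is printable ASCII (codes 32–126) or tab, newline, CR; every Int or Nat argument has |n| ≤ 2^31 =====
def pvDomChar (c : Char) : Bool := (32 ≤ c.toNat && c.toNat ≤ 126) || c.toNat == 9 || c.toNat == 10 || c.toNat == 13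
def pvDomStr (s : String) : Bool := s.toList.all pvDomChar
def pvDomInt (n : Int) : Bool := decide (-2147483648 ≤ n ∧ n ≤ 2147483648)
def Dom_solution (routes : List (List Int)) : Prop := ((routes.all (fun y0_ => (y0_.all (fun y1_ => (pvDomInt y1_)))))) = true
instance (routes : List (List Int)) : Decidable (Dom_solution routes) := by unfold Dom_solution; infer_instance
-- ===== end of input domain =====

-- B replaces A's quadratic check-array marking by the standard single-pass greedy after the same
-- sort by end (objective: faster, asymptotic). Equivalence is about the RETURN value only: the
-- Python A (and B) sorts `routes` in place, which a caller could observe.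

-- ===== PORT A =====
-- A-side helpers: x[1] and x[0]; total via getD — inside Pre_solution every route has length ≥ 2,
-- so the defaults are never consulted.
def aE (x : List Int) : Int := PySem.List.pyGetD x 1 0
def aS (x : List Int) : Int := PySem.List.pyGetD x 0 0
-- inner 'for j in range(i+1, len(routes))' body
def aInner (rs : List (List Int)) (camera : Int) (ch : List Int) (j : Int) : List Int :=
  if aS (PySem.List.pyGetD rs j []) ≤ camera ∧ camera ≤ aE (PySem.List.pyGetD rs j []) ∧
      PySem.List.pyGetD ch j 0 = 0
  then PySem.List.pySetD ch j 1 else ch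
-- outer loop body; state = (answer, camera, check); Python's `camera` is uninitialised before the
-- first iteration and is never read there (check[0] == 0), so the initial 0 is never consulted.
def aOuter (rs : List (List Int)) (st : Int × Int × List Int) (i : Int) : Int × Int × List Int :=
  let p := if PySem.List.pyGetD st.2.2 i 0 = 0
           then (st.1 + 1, aE (PySem.List.pyGetD rs i [])) else (st.1, st.2.1)
  (p.1, p.2, (PySem.List.pyRange (i + 1) rs.length 1).foldl (aInner rs p.2) st.2.2)

def solution (routes : List (List Int)) : Int :=
  let rs := PySem.List.sorted routes aE false
  ((PySem.List.pyRange 0 rs.length 1).foldl (aOuter rs)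
      (0, 0, List.replicate rs.length 0)).1

-- ===== PORT B =====
-- B-side helper: loop body over the routes themselves; state = (answer, camera : Option Int)
def bKey (x : List Int) : Int := PySem.List.pyGetD x 1 0
def bStep (st : Int × Option Int) (r : List Int) : Int × Option Int :=
  match st.2 with
  | none => (st.1 + 1, some (PySem.List.pyGetD r 1 0))
  | some c => if c < PySem.List.pyGetD r 0 0
              then (st.1 + 1, some (PySem.List.pyGetD r 1 0)) else st

def solution_alt (routes : List (List Int)) : Int :=
  ((PySem.List.sorted routes bKey false).foldl bStep (0, (none : Option Int))).1

-- ===== PRECONDITION & SPEC =====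
-- Pre_ excludes exactly the inputs on which Python A raises IndexError: a route shorter than 2
-- (x[1] in the sort key, routes[j][0]/routes[j][1] in the loop).
def Pre_solution (routes : List (List Int)) : Prop := ∀ r ∈ routes, 2 ≤ r.length
instance (routes : List (List Int)) : Decidable (Pre_solution routes) := by
  unfold Pre_solution; infer_instance
def pvWitness_solution : List (List Int) := [[1, 3], [2, 5], [-4, 0]]
def Spec_solution (routes : List (List Int)) (out : Int) : Prop := out = solution_alt routes
instance (routes : List (List Int)) (out : Int) : Decidable (Spec_solution routes out) := by
  unfold Spec_solution; infer_instance

-- ===== CLAIM (what is proved, stated in full; the proofs are below) =====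
def Claim_equal_solution : Prop := ∀ (routes : List (List Int)), Dom_solution routes →
  Pre_solution routes → Spec_solution routes (solution routes)

-- ===== LEMMAS AND PROOFS =====

-- characterisation of A's inner marking loop, started at index k
lemma inner_spec (rs : List (List Int)) (cam : Int) :
    ∀ (fuel k : Nat) (check : List Int), check.length = rs.length → rs.length ≤ k + fuel →
      (((PySem.List.pyRange (k : Int) rs.length 1).foldl (aInner rs cam) check).length = rs.length)
      ∧ ∀ j : Nat, j < rs.length →
        ((PySem.List.pyRange (k : Int) rs.length 1).foldl (aInner rs cam) check).getD j 0
          = if k ≤ j ∧ aS (rs.getD j []) ≤ cam ∧ cam ≤ aE (rs.getD j [])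
                ∧ check.getD j 0 = 0
            then 1 else check.getD j 0 := by
  intro fuel
  induction fuel with
  | zero =>
    intro k check hlen hle
    rw [PySem.List.pyRange_one_eq_nil (by exact_mod_cast (by omega : rs.length ≤ k))]
    refine ⟨hlen, fun j hj => ?_⟩
    simp only [List.foldl_nil]
    rw [if_neg (by omega)]
  | succ fuel ih =>
    intro k check hlen hle
    by_cases hk : rs.length ≤ k
    · rw [PySem.List.pyRange_one_eq_nil (by exact_mod_cast hk)]
      refine ⟨hlen, fun j hj => ?_⟩
      simp only [List.foldl_nil]
      rw [if_neg (by omega)]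
    · push Not at hk
      rw [PySem.List.pyRange_one_cons (by exact_mod_cast hk), List.foldl_cons]
      have hcast : (k : Int) + 1 = ((k + 1 : Nat) : Int) := by push_cast; ring
      rw [hcast]
      set check1 := aInner rs cam check (k : Int) with hchk1
      have hlen1 : check1.length = rs.length := by
        rw [hchk1]; unfold aInner
        split
        · rw [PySem.List.pySetD_natCast]; simpa using hlen
        · exact hlen
      have hget1 : ∀ j : Nat, check1.getD j 0
          = if j = k ∧ aS (rs.getD k []) ≤ cam ∧ cam ≤ aE (rs.getD k [])
                ∧ check.getD k 0 = 0
            then 1 else check.getD j 0 := by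
        intro j
        rw [hchk1]; unfold aInner
        simp only [PySem.List.pyGetD_natCast]
        by_cases hc : aS (rs.getD k []) ≤ cam ∧ cam ≤ aE (rs.getD k []) ∧ check.getD k 0 = 0
        · rw [if_pos hc, PySem.List.pySetD_natCast]
          by_cases hjk : j = k
          · subst hjk
            rw [if_pos ⟨rfl, hc⟩]
            rw [List.getD_eq_getElem?_getD, List.getElem?_set,
              if_pos rfl, if_pos (by omega)]
            simp
          · rw [if_neg (by tauto)]
            rw [List.getD_eq_getElem?_getD, List.getElem?_set, if_neg (by omega),
              ← List.getD_eq_getElem?_getD]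
        · rw [if_neg hc, if_neg (by tauto)]
      obtain ⟨ihlen, ihget⟩ := ih (k + 1) check1 hlen1 (by omega)
      refine ⟨ihlen, fun j hj => ?_⟩
      by_cases hjk : j = k
      · subst hjk
        rw [ihget j hj, if_neg (by omega), hget1 j]
        by_cases hc : aS (rs.getD j []) ≤ cam ∧ cam ≤ aE (rs.getD j []) ∧ check.getD j 0 = 0
        · rw [if_pos ⟨rfl, hc⟩, if_pos ⟨le_refl j, hc⟩]
        · rw [if_neg (by tauto), if_neg (by tauto)]
      · have h1 : check1.getD j 0 = check.getD j 0 := by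
          rw [hget1 j, if_neg (by tauto)]
        rw [ihget j hj, h1]
        by_cases hc : aS (rs.getD j []) ≤ cam ∧ cam ≤ aE (rs.getD j []) ∧ check.getD j 0 = 0
        · by_cases hkj : k ≤ j
          · rw [if_pos ⟨by omega, hc⟩, if_pos ⟨hkj, hc⟩]
          · rw [if_neg (by omega), if_neg (by omega)]
        · rw [if_neg (by tauto), if_neg (by tauto)]

-- coupling of A's outer loop (from index k) with B's single pass (over the dropped suffix)
lemma main_loop (rs : List (List Int)) (hs : rs.Pairwise (fun a b => aE a ≤ aE b)) :
    ∀ (fuel k : Nat), rs.length ≤ k + fuel →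
      ∀ (ans cam : Int) (camB : Option Int) (check : List Int),
        check.length = rs.length →
        (∀ c, camB = some c → c = cam ∧ ∀ j : Nat, k ≤ j → j < rs.length →
            c ≤ aE (rs.getD j [])) →
        (∀ j : Nat, k ≤ j → j < rs.length →
            (check.getD j 0 = 0 ↔ ∀ c, camB = some c → c < aS (rs.getD j []))) →
        ((PySem.List.pyRange (k : Int) rs.length 1).foldl (aOuter rs) (ans, cam, check)).1
          = ((rs.drop k).foldl bStep (ans, camB)).1 := by
  have hmono : ∀ (p q : Nat), p ≤ q → q < rs.length →
      aE (rs.getD p []) ≤ aE (rs.getD q []) := by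
    intro p q hpq hq
    rcases eq_or_lt_of_le hpq with rfl | hpq'
    · exact le_refl _
    · have := (List.pairwise_iff_getElem).1 hs p q (by omega) hq hpq'
      rwa [List.getD_eq_getElem _ _ (by omega : p < rs.length),
        List.getD_eq_getElem _ _ hq]
  intro fuel
  induction fuel with
  | zero =>
    intro k hle ans cam camB check hlen hcam hchk
    rw [PySem.List.pyRange_one_eq_nil (by exact_mod_cast (by omega : rs.length ≤ k)),
      List.drop_eq_nil_of_le (by omega)]
    rfl
  | succ fuel ih =>
    intro k hle ans cam camB check hlen hcam hchk
    by_cases hk : rs.length ≤ k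
    · rw [PySem.List.pyRange_one_eq_nil (by exact_mod_cast hk),
        List.drop_eq_nil_of_le (by omega)]
      rfl
    · push Not at hk
      rw [PySem.List.pyRange_one_cons (by exact_mod_cast hk), List.foldl_cons,
        List.drop_eq_getElem_cons hk, List.foldl_cons]
      have hrg : rs[k] = rs.getD k [] := (List.getD_eq_getElem _ _ hk).symm
      set r := rs.getD k [] with hr
      have hcast : (k : Int) + 1 = ((k + 1 : Nat) : Int) := by push_cast; ring
      by_cases hc0 : check.getD k 0 = 0
      · -- a new camera is placed at routes[k][1]
        have hstep : aOuter rs (ans, cam, check) (k : Int)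
            = (ans + 1, aE r,
              (PySem.List.pyRange ((k : Int) + 1) rs.length 1).foldl
                (aInner rs (aE r)) check) := by
          unfold aOuter
          simp only [PySem.List.pyGetD_natCast]
          rw [if_pos hc0]
        have hlt : ∀ c, camB = some c → c < aS r := ((hchk k (le_refl k) hk).1 hc0)
        have hb : bStep (ans, camB) r = (ans + 1, some (aE r)) := by
          cases camB with
          | none => rfl
          | some c =>
            have h1 : c < PySem.List.pyGetD r 0 0 := hlt c rfl
            simp only [bStep]
            rw [if_pos h1]
            rfl
        rw [hstep, hrg, hb, hcast]
        obtain ⟨hlen1, hget1⟩ := inner_spec rs (aE r) rs.length (k + 1) check hlen (by omega)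
        apply ih (k + 1) (by omega) (ans + 1) (aE r) (some (aE r)) _ hlen1
        · intro c hc
          injection hc with hc
          subst hc
          exact ⟨rfl, fun j hj1 hj2 => hmono k j (by omega) hj2⟩
        · intro j hj1 hj2
          rw [hget1 j hj2]
          by_cases hsle : aS (rs.getD j []) ≤ aE r
          · constructor
            · intro h0
              by_cases hcj : check.getD j 0 = 0
              · rw [if_pos ⟨hj1, hsle, hmono k j (by omega) hj2, hcj⟩] at h0
                omega
              · rw [if_neg (by tauto)] at h0
                exact absurd h0 hcj
            · intro h
              exact absurd (h (aE r) rfl) (not_lt.2 hsle)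
          · push Not at hsle
            have hcj : check.getD j 0 = 0 := by
              rw [hchk j (by omega) hj2]
              intro c hc
              have h1 : c ≤ aE r := (hcam c hc).2 k (le_refl k) hk
              omega
            rw [if_neg (by rintro ⟨-, h2, -, -⟩; omega)]
            constructor
            · intro _ c hc
              injection hc with hc
              omega
            · intro _
              exact hcj
      · -- routes[k] is already covered: no new camera, the inner loop changes nothing
        have hex : ∃ c, camB = some c ∧ aS r ≤ c := by
          by_contra hno
          push Not at hno
          exact hc0 ((hchk k (le_refl k) hk).2 (fun c hc => hno c hc))
        obtain ⟨c, hcB, hge⟩ := hex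
        obtain ⟨hceq, hcb⟩ := hcam c hcB
        subst hceq
        subst hcB
        have hge' : PySem.List.pyGetD r 0 0 ≤ c := hge
        have hstep : aOuter rs (ans, c, check) (k : Int)
            = (ans, c,
              (PySem.List.pyRange ((k : Int) + 1) rs.length 1).foldl
                (aInner rs c) check) := by
          unfold aOuter
          simp only [PySem.List.pyGetD_natCast]
          rw [if_neg hc0]
        have hb : bStep (ans, some c) r = (ans, some c) := by
          simp only [bStep]
          rw [if_neg (by omega)]
        rw [hstep, hrg, hb, hcast]
        obtain ⟨hlen1, hget1⟩ := inner_spec rs c rs.length (k + 1) check hlen (by omega)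
        apply ih (k + 1) (by omega) ans c (some c) _ hlen1
        · intro c2 hc2
          injection hc2 with hc2
          subst hc2
          exact ⟨rfl, fun j hj1 hj2 => hcb j (by omega) hj2⟩
        · intro j hj1 hj2
          rw [hget1 j hj2]
          have hnc : ¬ (k + 1 ≤ j ∧ aS (rs.getD j []) ≤ c ∧ c ≤ aE (rs.getD j [])
              ∧ check.getD j 0 = 0) := by
            rintro ⟨-, hsle, -, hcj⟩
            have := ((hchk j (by omega) hj2).1 hcj) c rfl
            omega
          rw [if_neg hnc]
          exact hchk j (by omega) hj2

-- ===== VERDICT (by name: the statement is the Claim_ definition above) =====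
theorem solution_spec : Claim_equal_solution := by
  intro routes _ _
  unfold Spec_solution solution solution_alt
  have hkey : bKey = aE := rfl
  rw [hkey]
  set rs := PySem.List.sorted routes aE false with hrs
  have hs : rs.Pairwise (fun a b => aE a ≤ aE b) := PySem.List.sorted_pairwise routes aE
  have := main_loop rs hs rs.length 0 (by omega) 0 0 none (List.replicate rs.length 0)
    (by simp) (by simp) (by simp)
  simpa using this
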